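-- pv_equiv track=rewrite | github.com/posl/comment_recommendation | script/mod_gen/4_time/zh/189_C/5.py | get_max_orange
-- ===== SOURCE A (Python) =====
-- def get_max_orange(orange_list):
--     max_orange = 0
--     for i in range(len(orange_list)):
--         for j in range(i, len(orange_list)):
--             for k in range(1, orange_list[j]+1):
--                 if max_orange < k * (j-i+1):
--                     max_orange = k * (j-i+1)
--     return max_orange
-- ===== SOURCE B (Python) =====
-- def get_max_orange(orange_list):
--     # Single pass: the best k*(j-i+1) for a fixed j uses i=0 and k=orange_list[j],
--     # so the answer is max(0, max_j orange_list[j]*(j+1)).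
--     best = 0
--     for j in range(len(orange_list)):
--         best = max(best, orange_list[j] * (j + 1))
--     return best
-- ===== Notes on version B (the rewrite author's own statement) =====
-- stated objective: faster
-- what changed: Replaced the triple nested loop over (i, j, k) by a single pass taking max(0, max_j orange_list[j]*(j+1)), since the inner max is attained at i=0, k=orange_list[j].
import Mathlib
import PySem

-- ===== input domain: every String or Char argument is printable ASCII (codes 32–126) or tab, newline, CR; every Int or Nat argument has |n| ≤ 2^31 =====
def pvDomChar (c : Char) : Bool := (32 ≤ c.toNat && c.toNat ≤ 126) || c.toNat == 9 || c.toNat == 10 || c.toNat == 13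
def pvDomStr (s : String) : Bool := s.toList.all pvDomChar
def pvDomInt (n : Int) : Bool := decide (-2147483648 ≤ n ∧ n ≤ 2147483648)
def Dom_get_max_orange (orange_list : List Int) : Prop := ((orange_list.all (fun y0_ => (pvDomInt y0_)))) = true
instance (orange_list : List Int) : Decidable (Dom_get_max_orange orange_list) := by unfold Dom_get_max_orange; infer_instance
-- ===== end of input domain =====

-- B replaces A's triple nested loop by a single pass computing max(0, max_j orange_list[j]*(j+1)); objective: faster (asymptotic).

-- ===== PORT A =====
-- triple nested loop; orange_list[j] is always in range here, so pyGetD with default 0 is exact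
def get_max_orange (orange_list : List Int) : Int :=
  (PySem.List.pyRange 0 (orange_list.length : Int) 1).foldl (fun m0 i =>
    (PySem.List.pyRange i (orange_list.length : Int) 1).foldl (fun m1 j =>
      (PySem.List.pyRange 1 (PySem.List.pyGetD orange_list j 0 + 1) 1).foldl (fun m2 k =>
        if m2 < k * (j - i + 1) then k * (j - i + 1) else m2) m1) m0) 0

-- ===== PORT B =====
def get_max_orange_alt (orange_list : List Int) : Int :=
  (PySem.List.pyRange 0 (orange_list.length : Int) 1).foldl (fun best j =>
    max best (PySem.List.pyGetD orange_list j 0 * (j + 1))) 0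

-- ===== PRECONDITION & SPEC =====
def Spec_get_max_orange (orange_list : List Int) (out : Int) : Prop := out = get_max_orange_alt orange_list
instance (orange_list : List Int) (out : Int) : Decidable (Spec_get_max_orange orange_list out) := by unfold Spec_get_max_orange; infer_instance

-- ===== CLAIM (what is proved, stated in full; the proofs are below) =====
def Claim_equal_get_max_orange : Prop := ∀ (orange_list : List Int), Dom_get_max_orange orange_list → Spec_get_max_orange orange_list (get_max_orange orange_list)

-- ===== LEMMAS AND PROOFS =====

-- fold-of-max helper: mfold f js m = max of m and f j over j ∈ js
def mfold (f : Int → Int) (js : List Int) (m : Int) : Int :=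
  js.foldl (fun m j => max m (f j)) m

theorem le_mfold (f : Int → Int) (js : List Int) (m : Int) : m ≤ mfold f js m := by
  induction js generalizing m with
  | nil => simp [mfold]
  | cons j js ih => exact le_trans (le_max_left _ _) (ih (max m (f j)))

theorem mfold_le_iff (f : Int → Int) (js : List Int) (m c : Int) :
    mfold f js m ≤ c ↔ m ≤ c ∧ ∀ j ∈ js, f j ≤ c := by
  induction js generalizing m with
  | nil => simp [mfold]
  | cons j js ih =>
    simp only [mfold, List.foldl_cons] at *
    rw [ih]
    simp only [List.mem_cons, max_le_iff]
    aesop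

theorem mem_le_mfold (f : Int → Int) (js : List Int) (m j : Int) (hj : j ∈ js) :
    f j ≤ mfold f js m := by
  induction js generalizing m with
  | nil => cases hj
  | cons a js ih =>
    rcases List.mem_cons.mp hj with rfl | hj
    · exact le_trans (le_max_right _ _) (le_mfold f js _)
    · exact ih _ hj

-- the innermost k-loop of A computes max m (v*c) when m ≥ 0 and c ≥ 1
theorem kfold_eq (v c m : Int) (hc : 1 ≤ c) (hm : 0 ≤ m) :
    (PySem.List.pyRange 1 (v + 1) 1).foldl
      (fun m2 k => if m2 < k * c then k * c else m2) m = max m (v * c) := by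
  rcases le_or_gt v 0 with hv | hv
  · rw [PySem.List.pyRange_one_eq_nil (by omega)]
    have : v * c ≤ 0 := by nlinarith
    simp [List.foldl_nil]
    omega
  · have hv1 : 1 ≤ v := hv
    clear hv
    induction v, hv1 using Int.le_induction with
    | base =>
      rw [PySem.List.pyRange_one_singleton]
      simp only [List.foldl_cons, List.foldl_nil, one_mul]
      split_ifs <;> omega
    | succ v hv1 ih =>
      rw [PySem.List.pyRange_one_succ_right (by omega), List.foldl_append]
      rw [ih]
      have hle : v * c ≤ (v + 1) * c := by nlinarith
      simp only [List.foldl_cons, List.foldl_nil]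
      split_ifs with h <;> omega

-- the middle j-loop of A equals mfold of g i, and stays ≥ its (nonnegative) start
theorem jfold_eq (l : List Int) (i : Int) (js : List Int) (m : Int)
    (hm : 0 ≤ m) (hj : ∀ j ∈ js, i ≤ j) :
    js.foldl (fun m1 j =>
      (PySem.List.pyRange 1 (PySem.List.pyGetD l j 0 + 1) 1).foldl
        (fun m2 k => if m2 < k * (j - i + 1) then k * (j - i + 1) else m2) m1) m
      = mfold (fun j => PySem.List.pyGetD l j 0 * (j - i + 1)) js m := by
  induction js generalizing m with
  | nil => simp [mfold]
  | cons j js ih =>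
    simp only [List.foldl_cons, mfold]
    have hij : i ≤ j := hj j (List.mem_cons_self ..)
    rw [kfold_eq _ _ _ (by omega) hm]
    exact ih (max m _) (le_trans hm (le_max_left _ _)) (fun x hx => hj x (List.mem_cons_of_mem _ hx))

-- A rewritten with mfold for the two inner loops
def ofold (l : List Int) (is : List Int) (m : Int) : Int :=
  is.foldl (fun m0 i =>
    mfold (fun j => PySem.List.pyGetD l j 0 * (j - i + 1))
      (PySem.List.pyRange i (l.length : Int) 1) m0) m

theorem A_eq_ofold (l : List Int) :
    get_max_orange l = ofold l (PySem.List.pyRange 0 (l.length : Int) 1) 0 := by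
  unfold get_max_orange ofold
  have key : ∀ (is : List Int) (m : Int), 0 ≤ m →
      is.foldl (fun m0 i =>
        (PySem.List.pyRange i (l.length : Int) 1).foldl (fun m1 j =>
          (PySem.List.pyRange 1 (PySem.List.pyGetD l j 0 + 1) 1).foldl (fun m2 k =>
            if m2 < k * (j - i + 1) then k * (j - i + 1) else m2) m1) m0) m
      = is.foldl (fun m0 i =>
          mfold (fun j => PySem.List.pyGetD l j 0 * (j - i + 1))
            (PySem.List.pyRange i (l.length : Int) 1) m0) m := by
    intro is
    induction is with
    | nil => intro m _; rfl
    | cons i is ih =>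
      intro m hm
      simp only [List.foldl_cons]
      rw [jfold_eq l i _ m hm (fun j hj => ((PySem.List.mem_pyRange_one).mp hj).1)]
      exact ih _ (le_trans hm (le_mfold _ _ _))
  exact key _ 0 le_rfl

theorem le_ofold (l : List Int) (is : List Int) (m : Int) : m ≤ ofold l is m := by
  induction is generalizing m with
  | nil => simp [ofold]
  | cons i is ih =>
    exact le_trans (le_mfold _ _ _) (ih _)

-- B as an mfold
theorem alt_eq_mfold (l : List Int) :
    get_max_orange_alt l
      = mfold (fun j => PySem.List.pyGetD l j 0 * (j - 0 + 1))
          (PySem.List.pyRange 0 (l.length : Int) 1) 0 := by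
  unfold get_max_orange_alt mfold
  simp

theorem alt_nonneg (l : List Int) : 0 ≤ get_max_orange_alt l := by
  rw [alt_eq_mfold]; exact le_mfold _ _ 0

-- every term of A's search is ≤ B's answer
theorem term_le_alt (l : List Int) (i j : Int) (h0 : 0 ≤ i) (hij : i ≤ j)
    (hj : j < (l.length : Int)) :
    PySem.List.pyGetD l j 0 * (j - i + 1) ≤ get_max_orange_alt l := by
  have hB0 : 0 ≤ get_max_orange_alt l := alt_nonneg l
  have hBj : PySem.List.pyGetD l j 0 * (j - 0 + 1) ≤ get_max_orange_alt l := by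
    rw [alt_eq_mfold]
    exact mem_le_mfold _ _ 0 j ((PySem.List.mem_pyRange_one).mpr ⟨by omega, hj⟩)
  rcases le_or_gt (PySem.List.pyGetD l j 0) 0 with hv | hv
  · nlinarith
  · nlinarith

theorem ofold_le_alt (l : List Int) (is : List Int) (m : Int)
    (h0 : ∀ i ∈ is, 0 ≤ i) (hm : m ≤ get_max_orange_alt l) :
    ofold l is m ≤ get_max_orange_alt l := by
  induction is generalizing m with
  | nil => simpa [ofold]
  | cons i is ih =>
    have step : ofold l (i :: is) m
        = ofold l is (mfold (fun j => PySem.List.pyGetD l j 0 * (j - i + 1))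
            (PySem.List.pyRange i (l.length : Int) 1) m) := rfl
    rw [step]
    refine ih _ (fun x hx => h0 x (List.mem_cons_of_mem _ hx)) ?_
    rw [mfold_le_iff]
    refine ⟨hm, fun j hj => ?_⟩
    have := (PySem.List.mem_pyRange_one).mp hj
    exact term_le_alt l i j (h0 i (List.mem_cons_self ..)) this.1 this.2

theorem alt_le_A (l : List Int) : get_max_orange_alt l ≤ get_max_orange l := by
  rw [A_eq_ofold]
  rcases le_or_gt (l.length : Int) 0 with h | h
  · rw [PySem.List.pyRange_one_eq_nil h] at *
    rw [alt_eq_mfold, PySem.List.pyRange_one_eq_nil h]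
    simp [ofold, mfold]
  · rw [PySem.List.pyRange_one_cons h]
    simp only [ofold, List.foldl_cons, zero_add]
    rw [alt_eq_mfold]
    exact le_trans le_rfl (le_ofold l _ _)

-- ===== VERDICT (by name: the statement is the Claim_ definition above) =====
theorem get_max_orange_spec : Claim_equal_get_max_orange := by
  intro l _
  unfold Spec_get_max_orange
  apply le_antisymm
  · rw [A_eq_ofold]
    apply ofold_le_alt l _ 0
      (fun i hi => ((PySem.List.mem_pyRange_one).mp hi).1) (alt_nonneg l)
  · exact alt_le_A l
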